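-- pv_equiv track=rewrite | github.com/ybordag/rhizome | agent/planner.py | _dependency_links
-- ===== SOURCE A (Python) =====
-- from typing import Any, Optional
--
-- def _dependency_links(tasks: list[dict[str, Any]]) -> list[dict[str, str]]:
--     links: list[dict[str, str]] = []
--     tasks_by_prefix: dict[str, list[dict[str, Any]]] = {}
--     for task in tasks:
--         prefix = task["id"].split("-")[0]
--         tasks_by_prefix.setdefault(prefix, []).append(task)
--     for group in tasks_by_prefix.values():
--         ordered = group
--         for previous, current in zip(ordered, ordered[1:]):
--             links.append({"blocking_task_id": previous["id"], "blocked_task_id": current["id"]})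
--     return links
-- ===== SOURCE B (Python) =====
-- def _dependency_links(tasks):
--     buckets = {}
--     for task in tasks:
--         task_id = task["id"]
--         prefix = task_id.split("-")[0]
--         entry = buckets.get(prefix)
--         if entry is None:
--             buckets[prefix] = (task_id, [])
--         else:
--             last_id, links = entry
--             links.append({"blocking_task_id": last_id, "blocked_task_id": task_id})
--             buckets[prefix] = (task_id, links)
--     out = []
--     for _, links in buckets.values():
--         out.extend(links)
--     return out
-- ===== Notes on version B (the rewrite author's own statement) =====
-- stated objective: alternative
-- what changed: B replaces A's two-phase grouping (build full per-prefix task lists, then a second nested pass zipping each group with its tail) by a single fused pass that keeps only the last-seen task id and an accumulated link list per prefix, flattening the buckets at the end.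
import Mathlib
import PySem

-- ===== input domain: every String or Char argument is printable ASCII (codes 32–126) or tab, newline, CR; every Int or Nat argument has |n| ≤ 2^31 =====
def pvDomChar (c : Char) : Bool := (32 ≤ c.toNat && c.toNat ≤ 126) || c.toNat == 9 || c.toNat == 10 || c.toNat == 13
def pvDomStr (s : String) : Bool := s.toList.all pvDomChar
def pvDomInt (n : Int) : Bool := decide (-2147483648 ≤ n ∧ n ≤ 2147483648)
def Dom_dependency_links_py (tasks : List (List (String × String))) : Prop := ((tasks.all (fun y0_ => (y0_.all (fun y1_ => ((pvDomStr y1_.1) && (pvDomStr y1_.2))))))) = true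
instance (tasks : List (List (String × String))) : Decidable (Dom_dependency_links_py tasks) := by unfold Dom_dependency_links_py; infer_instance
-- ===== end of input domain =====

-- B fuses grouping and linking into ONE pass keeping only the last-seen id per prefix
-- (plus that prefix's link bucket), instead of A's two phases over full per-prefix group lists;
-- objective: simpler/alternative decomposition, same asymptotic cost.

-- shared helpers (both Pythons build these same values)
-- task["id"]: first-match association-list lookup; KeyError (no "id" key) is excluded by Pre_,
-- so the `getD ""` default is never reached on admitted inputs.
def pvId (t : List (String × String)) : String :=
  ((PySem.Dict.mk t).get? "id").getD ""

-- task["id"].split("-")[0]; split? with the nonempty separator "-" is always `some` of a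
-- nonempty list, so neither default is ever reached.
def pvPrefix (s : String) : String :=
  ((PySem.Str.split? s "-").getD []).headD ""

def pvLink (a b : String) : List (String × String) :=
  [("blocking_task_id", a), ("blocked_task_id", b)]

-- ===== PORT A =====
def dependency_links_py (tasks : List (List (String × String))) : List (List (String × String)) :=
  -- first loop: tasks_by_prefix.setdefault(prefix, []).append(task)
  let tasks_by_prefix : PySem.Dict String (List (List (String × String))) :=
    tasks.foldl (fun d task => d.modify (pvPrefix (pvId task)) [] (· ++ [task])) PySem.Dict.empty
  -- second loop: for group in values: for previous, current in zip(ordered, ordered[1:])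
  tasks_by_prefix.values.foldl
    (fun links ordered =>
      (ordered.zip (PySem.List.slice ordered (some 1) none)).foldl
        (fun ls pc => ls ++ [pvLink (pvId pc.1) (pvId pc.2)]) links)
    []

-- ===== PORT B =====
def dependency_links_py_alt (tasks : List (List (String × String))) : List (List (String × String)) :=
  let buckets : PySem.Dict String (String × List (List (String × String))) :=
    tasks.foldl
      (fun d task =>
        let tid := pvId task
        let pfx := pvPrefix tid
        match d.get? pfx with
        | none => d.insert pfx (tid, [])
        | some e => d.insert pfx (tid, e.2 ++ [pvLink e.1 tid]))
      PySem.Dict.empty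
  buckets.values.foldl (fun out e => out ++ e.2) []

-- ===== PRECONDITION & SPEC =====
-- Pre_ excludes exactly the inputs where A raises KeyError: a task dict without an "id" key.
def Pre_dependency_links_py (tasks : List (List (String × String))) : Prop :=
  (tasks.all (fun t => (PySem.Dict.mk t).contains "id")) = true
instance (tasks : List (List (String × String))) : Decidable (Pre_dependency_links_py tasks) := by
  unfold Pre_dependency_links_py; infer_instance

def pvWitness_dependency_links_py : (List (List (String × String))) :=
  [[("id", "db-1")], [("id", "db-2")], [("id", "ui-1")]]

def Spec_dependency_links_py (tasks : List (List (String × String))) (out : List (List (String × String))) : Prop := out = dependency_links_py_alt tasks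
instance (tasks : List (List (String × String))) (out : List (List (String × String))) : Decidable (Spec_dependency_links_py tasks out) := by unfold Spec_dependency_links_py; infer_instance

-- ===== CLAIM (what is proved, stated in full; the proofs are below) =====
def Claim_equal_dependency_links_py : Prop := ∀ (tasks : List (List (String × String))), Dom_dependency_links_py tasks → Pre_dependency_links_py tasks → Spec_dependency_links_py tasks (dependency_links_py tasks)

-- ===== LEMMAS AND PROOFS =====

-- B's bucket value for a group list of A: (id of last task, the group's consecutive links)
def pvF (g : List (List (String × String))) : String × List (List (String × String)) :=
  (pvId (g.getLastD []), (g.zip (g.drop 1)).map (fun pc => pvLink (pvId pc.1) (pvId pc.2)))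

theorem pvGet?_mk_map {ν₁ ν₂ : Type} (f : ν₁ → ν₂) (l : List (String × ν₁)) (k : String) :
    (PySem.Dict.mk (l.map (fun p => (p.1, f p.2)))).get? k = ((PySem.Dict.mk l).get? k).map f := by
  induction l with
  | nil => rfl
  | cons p rest ih =>
      obtain ⟨a, b⟩ := p
      simp only [List.map_cons, PySem.Dict.get?_mk_cons]
      by_cases h : (a == k) = true <;> simp [h, ih]

theorem pvZip_append_last {α : Type} (x : α) (g : List α) (t : α) (d : α) :
    ((x :: g) ++ [t]).zip (((x :: g) ++ [t]).drop 1)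
      = (x :: g).zip ((x :: g).drop 1) ++ [((x :: g).getLastD d, t)] := by
  induction g generalizing x with
  | nil => simp
  | cons y g' ih =>
      simpa using ih y

theorem pvF_append (g : List (List (String × String))) (t : List (String × String)) (hg : g ≠ []) :
    pvF (g ++ [t]) = (pvId t, (pvF g).2 ++ [pvLink (pvF g).1 (pvId t)]) := by
  obtain ⟨x, g', rfl⟩ : ∃ x g', g = x :: g' := by
    cases g with | nil => exact absurd rfl hg | cons a b => exact ⟨a, b, rfl⟩
  unfold pvF
  rw [pvZip_append_last x g' t []]
  have hlast : ((x :: g') ++ [t]).getLastD ([] : List (String × String)) = t :=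
    List.getLastD_concat
  rw [hlast]
  simp

-- the two first loops stay in lock-step: B's dict is A's dict with pvF applied to every value
theorem pvLoop_rel (tasks : List (List (String × String))) :
    ∀ (dA : PySem.Dict String (List (List (String × String)))),
      (∀ p ∈ dA.items, p.2 ≠ []) →
      (tasks.foldl
          (fun d task =>
            let tid := pvId task
            let pfx := pvPrefix tid
            match d.get? pfx with
            | none => d.insert pfx (tid, [])
            | some e => d.insert pfx (tid, e.2 ++ [pvLink e.1 tid]))
          (PySem.Dict.mk (dA.items.map (fun p => (p.1, pvF p.2)))))
        = PySem.Dict.mk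
            ((tasks.foldl (fun d task => d.modify (pvPrefix (pvId task)) [] (· ++ [task])) dA).items.map
              (fun p => (p.1, pvF p.2))) := by
  induction tasks with
  | nil => intro dA _; rfl
  | cons task rest ih =>
      intro dA hne
      simp only [List.foldl_cons]
      set pfx := pvPrefix (pvId task) with hpfx
      have hget := pvGet?_mk_map pvF dA.items pfx
      have hmkA : PySem.Dict.mk dA.items = dA := rfl
      rw [hmkA] at hget
      have hmodify : dA.modify pfx [] (· ++ [task])
          = dA.insert pfx ((dA.getD pfx []) ++ [task]) := rfl
      cases hA : dA.get? pfx with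
      | none =>
          have hc : dA.contains pfx = false := (PySem.Dict.get?_eq_none_iff_contains dA pfx).mp hA
          have hcB : (PySem.Dict.mk (dA.items.map (fun p => (p.1, pvF p.2)))).contains pfx = false := by
            rw [PySem.Dict.contains_eq_isSome_get?, pvGet?_mk_map, hA]; rfl
          have hgetD : dA.getD pfx [] = [] := by
            rw [PySem.Dict.getD_eq_get?_getD, hA]; rfl
          have hBstep :
              (PySem.Dict.mk (dA.items.map (fun p => (p.1, pvF p.2)))).get? pfx = none := by
            rw [pvGet?_mk_map, hA]; rfl
          have hinv' : ∀ p ∈ (dA.modify pfx [] (· ++ [task])).items, p.2 ≠ [] := by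
            intro p hp
            rw [hmodify, hgetD, PySem.Dict.items_insert_of_not_contains _ _ hc] at hp
            rcases List.mem_append.mp hp with h | h
            · exact hne p h
            · simp at h; subst h; simp
          have hstep :
              (PySem.Dict.mk (dA.items.map (fun p => (p.1, pvF p.2)))).insert pfx (pvId task, [])
                = PySem.Dict.mk ((dA.modify pfx [] (· ++ [task])).items.map (fun p => (p.1, pvF p.2))) := by
            apply PySem.Dict.ext
            rw [PySem.Dict.items_insert_of_not_contains _ _ hcB,
                hmodify, hgetD, PySem.Dict.items_insert_of_not_contains _ _ hc]
            simp [pvF]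
          simp only [hBstep]
          rw [hstep]
          exact ih _ hinv'
      | some g =>
          have hgne : g ≠ [] := hne (pfx, g) (PySem.Dict.mem_items_of_get?_eq_some dA hA)
          have hc : dA.contains pfx = true := by
            rw [PySem.Dict.contains_eq_isSome_get?, hA]; rfl
          have hcB : (PySem.Dict.mk (dA.items.map (fun p => (p.1, pvF p.2)))).contains pfx = true := by
            rw [PySem.Dict.contains_eq_isSome_get?, pvGet?_mk_map, hA]; rfl
          have hgetD : dA.getD pfx [] = g := by
            rw [PySem.Dict.getD_eq_get?_getD, hA]; rfl
          have hBstep :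
              (PySem.Dict.mk (dA.items.map (fun p => (p.1, pvF p.2)))).get? pfx = some (pvF g) := by
            rw [pvGet?_mk_map, hA]; rfl
          have hinv' : ∀ p ∈ (dA.modify pfx [] (· ++ [task])).items, p.2 ≠ [] := by
            intro p hp
            rw [hmodify, hgetD, PySem.Dict.items_insert_of_contains _ _ hc] at hp
            rcases List.mem_map.mp hp with ⟨q, hq, hpq⟩
            by_cases hk : (q.1 == pfx) = true
            · simp only [hk, if_true] at hpq; subst hpq; simp
            · simp only [hk] at hpq; subst hpq; exact hne q hq
          have hstep :
              (PySem.Dict.mk (dA.items.map (fun p => (p.1, pvF p.2)))).insert pfx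
                  (pvId task, (pvF g).2 ++ [pvLink (pvF g).1 (pvId task)])
                = PySem.Dict.mk ((dA.modify pfx [] (· ++ [task])).items.map (fun p => (p.1, pvF p.2))) := by
            apply PySem.Dict.ext
            rw [PySem.Dict.items_insert_of_contains _ _ hcB,
                hmodify, hgetD, PySem.Dict.items_insert_of_contains _ _ hc]
            rw [List.map_map, List.map_map]
            apply List.map_congr_left
            intro p _
            by_cases hk : (p.1 == pfx) = true <;>
              simp [hk, Function.comp, pvF_append g task hgne]
          simp only [hBstep]
          rw [hstep]
          exact ih _ hinv'

-- A's second (nested) loop, rewritten group by group: it appends exactly (pvF g).2 per group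
theorem pvA_second_loop (gs : List (List (List (String × String)))) (acc : List (List (String × String))) :
    gs.foldl
        (fun links ordered =>
          (ordered.zip (PySem.List.slice ordered (some 1) none)).foldl
            (fun ls pc => ls ++ [pvLink (pvId pc.1) (pvId pc.2)]) links) acc
      = gs.foldl (fun links g => links ++ (pvF g).2) acc := by
  apply PySem.List.foldl_congr_mem
  intro a g _
  rw [PySem.List.slice_from g (by norm_num : (0:Int) ≤ 1),
      PySem.List.foldl_append_singleton_eq_map]
  rfl

-- ===== VERDICT (by name: the statement is the Claim_ definition above) =====
theorem dependency_links_py_spec : Claim_equal_dependency_links_py := by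
  intro tasks _ _
  unfold Spec_dependency_links_py
  have h := pvLoop_rel tasks PySem.Dict.empty (by intro p hp; cases hp)
  have hempty : (PySem.Dict.mk
      ((PySem.Dict.empty : PySem.Dict String (List (List (String × String)))).items.map
        (fun p => (p.1, pvF p.2)))) = PySem.Dict.empty := rfl
  rw [hempty] at h
  show dependency_links_py tasks = dependency_links_py_alt tasks
  simp only [dependency_links_py, dependency_links_py_alt]
  rw [pvA_second_loop, h]
  simp only [PySem.Dict.values, List.foldl_map]
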